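-- pv_equiv track=rewrite | github.com/maxtrussell/advent-of-code | 2021/04/main.py | find_winning_boards
-- ===== SOURCE A (Python) =====
-- def find_winning_boards(winning_combos, board_wins):
--     winning_boards = set()
--     for combo in winning_combos:
--         for board, wins in board_wins.items():
--             if combo in wins:
--                 winning_boards.add(board)
--                 break
--     return winning_boards
-- ===== SOURCE B (Python) =====
-- def find_winning_boards(winning_combos, board_wins):
--     # Invert once: number -> first board (in dict order) whose wins contain it.
--     first_owner = {}
--     for board, wins in board_wins.items():
--         for w in wins:
--             if w not in first_owner:
--                 first_owner[w] = board
--     winning_boards = set()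
--     for combo in winning_combos:
--         if combo in first_owner:
--             winning_boards.add(first_owner[combo])
--     return winning_boards
-- ===== Notes on version B (the rewrite author's own statement) =====
-- stated objective: faster
-- what changed: Instead of scanning the boards' win-lists for every combo, B builds a number->first-owning-board index once and answers each combo by a single dict lookup.
import Mathlib
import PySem

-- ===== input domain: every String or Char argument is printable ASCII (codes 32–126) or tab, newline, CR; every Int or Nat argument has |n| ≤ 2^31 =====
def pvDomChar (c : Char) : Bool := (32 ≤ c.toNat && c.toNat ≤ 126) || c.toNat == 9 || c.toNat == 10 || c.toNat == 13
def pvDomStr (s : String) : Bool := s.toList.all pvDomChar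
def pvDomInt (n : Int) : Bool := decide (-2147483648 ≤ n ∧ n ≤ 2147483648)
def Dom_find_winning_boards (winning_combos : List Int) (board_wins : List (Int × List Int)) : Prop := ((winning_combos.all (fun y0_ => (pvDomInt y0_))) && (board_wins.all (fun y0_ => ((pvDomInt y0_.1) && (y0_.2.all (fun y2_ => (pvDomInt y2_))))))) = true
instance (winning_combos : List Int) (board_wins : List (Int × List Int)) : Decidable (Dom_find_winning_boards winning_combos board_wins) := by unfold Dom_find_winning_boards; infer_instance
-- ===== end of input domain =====

-- B replaces A's per-combo scan over every board by a number->first-owning-board index built once (objective: faster, asymptotically).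

-- ===== PORT A =====
-- inner 'for board, wins in board_wins.items(): if combo in wins: add; break'
def pvInnerA (combo : Int) (bw : List (Int × List Int)) (s : PySem.Set Int) : PySem.Set Int :=
  match bw with
  | [] => s
  | (board, wins) :: rest =>
    if wins.contains combo then PySem.Set.add s board
    else pvInnerA combo rest s

def find_winning_boards (winning_combos : List Int) (board_wins : List (Int × List Int)) : List Int :=
  winning_combos.foldl (fun s combo => pvInnerA combo board_wins s) PySem.Set.empty

-- ===== PORT B =====
-- 'for board, wins in board_wins.items(): for w in wins: if w not in first_owner: first_owner[w] = board'
def pvBuildIndex (bw : List (Int × List Int)) : PySem.Dict Int Int :=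
  bw.foldl (fun d p =>
    p.2.foldl (fun d w => if d.contains w then d else d.insert w p.1) d)
    PySem.Dict.empty

-- 'if combo in first_owner: winning_boards.add(first_owner[combo])' rendered via get?
def find_winning_boards_alt (winning_combos : List Int) (board_wins : List (Int × List Int)) : List Int :=
  let idx := pvBuildIndex board_wins
  winning_combos.foldl (fun s combo =>
    match idx.get? combo with
    | some b => PySem.Set.add s b
    | none => s) PySem.Set.empty

-- ===== PRECONDITION & SPEC =====
def Spec_find_winning_boards (winning_combos : List Int) (board_wins : List (Int × List Int)) (out : List Int) : Prop := out = find_winning_boards_alt winning_combos board_wins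
instance (winning_combos : List Int) (board_wins : List (Int × List Int)) (out : List Int) : Decidable (Spec_find_winning_boards winning_combos board_wins out) := by unfold Spec_find_winning_boards; infer_instance

-- ===== CLAIM (what is proved, stated in full; the proofs are below) =====
def Claim_equal_find_winning_boards : Prop := ∀ (winning_combos : List Int) (board_wins : List (Int × List Int)), Dom_find_winning_boards winning_combos board_wins → Spec_find_winning_boards winning_combos board_wins (find_winning_boards winning_combos board_wins)

-- ===== LEMMAS AND PROOFS =====

-- first board (in order) whose win-list contains c
def pvFirstOwner (c : Int) : List (Int × List Int) → Option Int
  | [] => none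
  | (b, ws) :: rest => if ws.contains c then some b else pvFirstOwner c rest

theorem pvInner_get? (c b : Int) (ws : List Int) : ∀ (d : PySem.Dict Int Int),
    (ws.foldl (fun d w => if d.contains w then d else d.insert w b) d).get? c
      = (d.get? c).or (if ws.contains c then some b else none) := by
  induction ws with
  | nil => intro d; simp
  | cons w rest ih =>
    intro d
    simp only [List.foldl_cons, ih]
    by_cases hw : d.contains w = true
    · simp only [hw, if_true, List.contains_cons]
      by_cases hcw : c = w
      · subst hcw
        rw [PySem.Dict.contains_eq_isSome_get?] at hw
        obtain ⟨v, hv⟩ := Option.isSome_iff_exists.mp hw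
        simp [hv]
      · simp [hcw]
    · simp only [hw, List.contains_cons]
      by_cases hcw : c = w
      · subst hcw
        have hd : d.get? c = none := by
          cases h : d.get? c with
          | none => rfl
          | some v =>
            exact absurd (by rw [PySem.Dict.contains_eq_isSome_get?, h]; rfl) hw
        simp [hd]
      · simp [PySem.Dict.get?_insert, hcw]

theorem pvBuild_get? (c : Int) (bw : List (Int × List Int)) :
    (pvBuildIndex bw).get? c = pvFirstOwner c bw := by
  have h : ∀ (l : List (Int × List Int)) (d : PySem.Dict Int Int),
      (l.foldl (fun d p => p.2.foldl (fun d w => if d.contains w then d else d.insert w p.1) d) d).get? c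
        = (d.get? c).or (pvFirstOwner c l) := by
    intro l
    induction l with
    | nil => intro d; simp [pvFirstOwner]
    | cons p rest ih =>
      intro d
      simp only [List.foldl_cons, ih, pvInner_get?, Option.or_assoc]
      rcases p with ⟨b, ws⟩
      simp only [pvFirstOwner]
      split_ifs <;> simp
  simpa using h bw PySem.Dict.empty

theorem pvInnerA_eq (c : Int) (bw : List (Int × List Int)) (s : PySem.Set Int) :
    pvInnerA c bw s = (match pvFirstOwner c bw with
                       | some b => PySem.Set.add s b
                       | none => s) := by
  induction bw with
  | nil => simp [pvInnerA, pvFirstOwner]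
  | cons p rest ih =>
    rcases p with ⟨b, ws⟩
    simp only [pvInnerA, pvFirstOwner]
    split_ifs <;> simp [ih]

-- ===== VERDICT (by name: the statement is the Claim_ definition above) =====
theorem find_winning_boards_spec : Claim_equal_find_winning_boards := by
  intro wc bw _
  unfold Spec_find_winning_boards find_winning_boards find_winning_boards_alt
  have h : (fun (s : PySem.Set Int) (combo : Int) => pvInnerA combo bw s)
      = (fun (s : PySem.Set Int) (combo : Int) =>
          match (pvBuildIndex bw).get? combo with
          | some b => PySem.Set.add s b
          | none => s) := by
    funext s combo
    rw [pvInnerA_eq, pvBuild_get?]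
  simp only [h]
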